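-- pv_equiv track=rewrite | github.com/ChrnyaevEK/Stoke_by_url | main.py | get_all_uniq_masks
-- ===== SOURCE A (Python) =====
-- def get_all_uniq_masks(source_list):
--     """
--     Function creates set of unique masks for list/set of lines., ex.: 'qwerty12>45tr' ---> 'LNSNL'
--     (for analyse purposes)
--     The Letter will be represented with L, Number with N and Symbol with S
--     """
--     # Set appropriate symbols to use
--     letter = 'L'
--     number = 'N'
--     sign = 'S'
--     uniq_masks = set()
--     for source_str in source_list:
--         mask = ''  # Middle mask
--         last = ''  # Type of last symbol found
--         for symb in source_str:
--             # Control for numbers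
--             if symb.isnumeric():
--                 if last != number:
--                     mask += number
--                     last = number
--                 else:
--                     continue
--             # Control for letters
--             elif symb.isalpha():
--                 if last != letter:
--                     mask += letter
--                     last = letter
--                 else:
--                     continue
--             # Else - it is sign
--             else:
--                 if last != sign:
--                     mask += sign
--                     last = sign
--                 else:
--                     continue
--         # As  mask is created - it should be unique - that's why sets are used
--         uniq_masks.add(mask)
--     return uniq_masks
-- ===== SOURCE B (Python) =====
-- def get_all_uniq_masks(source_list):
--     """Run-skipping re-implementation: at each run start pick the class letter
--     and its run predicate, then advance the index past the whole run."""
--     def not_alnum(ch):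
--         return not ch.isnumeric() and not ch.isalpha()
--     masks = set()
--     for s in source_list:
--         mask = []
--         i, n = 0, len(s)
--         while i < n:
--             c = s[i]
--             if c.isnumeric():
--                 k, run = 'N', str.isnumeric
--             elif c.isalpha():
--                 k, run = 'L', str.isalpha
--             else:
--                 k, run = 'S', not_alnum
--             mask.append(k)
--             i += 1
--             while i < n and run(s[i]):
--                 i += 1
--         masks.add(''.join(mask))
--     return masks
-- ===== Notes on version B (the rewrite author's own statement) =====
-- stated objective: alternative
-- what changed: Replaced A's flat per-character loop with a last-type flag (three branches each updating mask/last) by a run-skipping index scan: classify only the first character of each run, emit its letter, then an inner loop advances the index past the rest of the run with that run's predicate; no cross-iteration 'last' state.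
import Mathlib
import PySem

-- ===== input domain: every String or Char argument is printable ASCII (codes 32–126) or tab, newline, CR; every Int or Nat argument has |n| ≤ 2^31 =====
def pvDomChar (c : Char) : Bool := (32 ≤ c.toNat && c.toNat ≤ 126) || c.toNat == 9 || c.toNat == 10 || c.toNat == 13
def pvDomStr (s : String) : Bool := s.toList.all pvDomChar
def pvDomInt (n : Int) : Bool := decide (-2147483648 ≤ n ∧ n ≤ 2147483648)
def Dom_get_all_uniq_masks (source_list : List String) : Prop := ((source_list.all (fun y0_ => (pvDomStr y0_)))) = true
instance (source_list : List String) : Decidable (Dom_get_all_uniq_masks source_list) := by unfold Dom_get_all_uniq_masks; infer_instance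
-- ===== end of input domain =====

-- B replaces A's per-character last-type state machine by a run-skipping scan (classify the run head, then skip the whole run); alternative decomposition, same cost.


-- ===== PORT A =====
-- Inner loop: state (mask, last); symb.isnumeric() is PySem.Chars.isdigit (exact on the ASCII domain).
def pvMaskA (source_str : String) : String :=
  String.ofList (source_str.toList.foldl
    (fun (st : List Char × String) symb =>
      if PySem.Chars.isdigit symb then
        if st.2 ≠ "N" then (st.1 ++ ['N'], "N") else st
      else if PySem.Chars.isalpha symb then
        if st.2 ≠ "L" then (st.1 ++ ['L'], "L") else st
      else
        if st.2 ≠ "S" then (st.1 ++ ['S'], "S") else st)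
    ([], "")).1

def get_all_uniq_masks (source_list : List String) : List String :=
  source_list.foldl (fun uniq_masks source_str => PySem.Set.add uniq_masks (pvMaskA source_str))
    PySem.Set.empty

-- ===== PORT B =====
-- Source B's not_alnum run predicate
def pvNotAlnum (ch : Char) : Bool := !PySem.Chars.isdigit ch && !PySem.Chars.isalpha ch

-- Source B's while loop over s: emit the head's class letter, then skip past the run
-- (the inner 'while i < n and run(s[i]): i += 1' is the dropWhile of the run predicate).
def pvRunMask : List Char → List Char
  | [] => []
  | c :: t =>
    if PySem.Chars.isdigit c then 'N' :: pvRunMask (t.dropWhile PySem.Chars.isdigit)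
    else if PySem.Chars.isalpha c then 'L' :: pvRunMask (t.dropWhile PySem.Chars.isalpha)
    else 'S' :: pvRunMask (t.dropWhile pvNotAlnum)
  termination_by l => l.length
  decreasing_by
    all_goals
      simpa using Nat.lt_succ_of_le (List.length_dropWhile_le _ _)

def get_all_uniq_masks_alt (source_list : List String) : List String :=
  source_list.foldl
    (fun masks s => PySem.Set.add masks (String.ofList (pvRunMask s.toList)))
    PySem.Set.empty

-- ===== PRECONDITION & SPEC =====
def Spec_get_all_uniq_masks (source_list : List String) (out : List String) : Prop := out = get_all_uniq_masks_alt source_list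
instance (source_list : List String) (out : List String) : Decidable (Spec_get_all_uniq_masks source_list out) := by unfold Spec_get_all_uniq_masks; infer_instance

-- ===== CLAIM (what is proved, stated in full; the proofs are below) =====
def Claim_equal_get_all_uniq_masks : Prop := ∀ (source_list : List String), Dom_get_all_uniq_masks source_list → Spec_get_all_uniq_masks source_list (get_all_uniq_masks source_list)

-- ===== LEMMAS AND PROOFS =====

-- proof-side normal form both masks are reduced to: classify each char, collapse runs
def pvClassify (c : Char) : Char :=
  if PySem.Chars.isdigit c then 'N' else if PySem.Chars.isalpha c then 'L' else 'S'

def pvCollapse : List Char → List Char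
  | [] => []
  | [a] => [a]
  | a :: b :: t => if a == b then pvCollapse (b :: t) else a :: pvCollapse (b :: t)

-- A's step, rewritten through the classifier
lemma pvStepA_eq : (fun (st : List Char × String) symb =>
      if PySem.Chars.isdigit symb then
        if st.2 ≠ "N" then (st.1 ++ ['N'], "N") else st
      else if PySem.Chars.isalpha symb then
        if st.2 ≠ "L" then (st.1 ++ ['L'], "L") else st
      else
        if st.2 ≠ "S" then (st.1 ++ ['S'], "S") else st)
    = (fun (st : List Char × String) symb =>
      if st.2 = String.ofList [pvClassify symb] then st
      else (st.1 ++ [pvClassify symb], String.ofList [pvClassify symb])) := by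
  funext st symb
  unfold pvClassify
  by_cases h1 : PySem.Chars.isdigit symb <;> by_cases h2 : PySem.Chars.isalpha symb <;>
    simp [h1, h2]

lemma pvFoldG (ks : List Char) : ∀ (mask : List Char) (l : Char),
    (ks.foldl (fun (st : List Char × String) k =>
        if st.2 = String.ofList [k] then st else (st.1 ++ [k], String.ofList [k]))
      (mask ++ [l], String.ofList [l])).1 = mask ++ pvCollapse (l :: ks) := by
  induction ks with
  | nil => intro mask l; simp [pvCollapse]
  | cons k ks ih =>
    intro mask l
    by_cases h : l = k
    · subst h
      simp only [List.foldl_cons, pvCollapse, beq_self_eq_true, if_true]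
      cases ks with
      | nil => simp [pvCollapse]
      | cons k' ks' => exact ih mask l
    · have hne : ¬ String.ofList [l] = String.ofList [k] :=
        fun hc => h (by simpa using congrArg String.toList hc)
      simp only [List.foldl_cons, if_neg hne]
      have := ih (mask ++ [l]) k
      simpa [pvCollapse, h, List.append_assoc] using this

lemma pvMaskA_eq_collapse (s : String) :
    pvMaskA s = String.ofList (pvCollapse (s.toList.map pvClassify)) := by
  unfold pvMaskA
  rw [pvStepA_eq,
    ← List.foldl_map (f := pvClassify)
      (g := fun (st : List Char × String) k =>
        if st.2 = String.ofList [k] then st else (st.1 ++ [k], String.ofList [k]))]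
  cases hcs : s.toList.map pvClassify with
  | nil => simp [pvCollapse]
  | cons k ks =>
    have hemp : ¬ ("" : String) = String.ofList [k] := by
      intro h; exact absurd (congrArg String.toList h) (by simp)
    simp only [List.foldl_cons, if_neg hemp]
    rw [congrArg String.ofList (pvFoldG ks [] k)]
    simp

-- collapsing past one run: if p is exactly 'classifies to k', the whole run is absorbed
lemma pvCollapse_run (k : Char) (p : Char → Bool)
    (hp : ∀ x, p x = (pvClassify x == k)) (l : List Char) :
    pvCollapse (k :: l.map pvClassify)
      = k :: pvCollapse ((l.dropWhile p).map pvClassify) := by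
  induction l with
  | nil => simp [pvCollapse]
  | cons c t ih =>
    by_cases h : p c
    · have hk : pvClassify c = k := by
        have := hp c; rw [h] at this; exact (beq_iff_eq.mp this.symm)
      simp only [List.map_cons, pvCollapse, hk, beq_self_eq_true, if_true,
        List.dropWhile_cons, h]
      rw [← hk] at ih ⊢
      exact ih
    · have hk : ¬ pvClassify c = k := by
        intro hc
        exact h (by rw [hp c, hc]; simp)
      have hne : (k == pvClassify c) = false := by
        simp [beq_eq_false_iff_ne]; exact fun hc => hk hc.symm
      simp [pvCollapse, hne, h]

lemma pvDigit_not_alpha (x : Char) (h : PySem.Chars.isdigit x) :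
    PySem.Chars.isalpha x = false := by
  by_contra hc
  simp [PySem.Chars.isdigit, PySem.Chars.isalpha, PySem.Chars.isupper, PySem.Chars.islower,
    Char.le_def, UInt32.le_iff_toNat_le] at h hc
  omega

lemma pvRunMask_eq_collapse (l : List Char) :
    pvRunMask l = pvCollapse (l.map pvClassify) := by
  fun_induction pvRunMask l with
  | case1 => simp [pvCollapse]
  | case2 c t h ih =>
    have hk : pvClassify c = 'N' := by simp [pvClassify, h]
    rw [List.map_cons, hk,
      pvCollapse_run 'N' PySem.Chars.isdigit
        (fun x => by unfold pvClassify; by_cases h1 : PySem.Chars.isdigit x <;>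
          by_cases h2 : PySem.Chars.isalpha x <;> simp [h1, h2]) t, ih]
  | case3 c t h1 h2 ih =>
    have hk : pvClassify c = 'L' := by simp [pvClassify, h1, h2]
    rw [List.map_cons, hk,
      pvCollapse_run 'L' PySem.Chars.isalpha
        (fun x => by
          by_cases g1 : PySem.Chars.isdigit x
          · simp [pvClassify, g1, pvDigit_not_alpha x g1]
          · by_cases g2 : PySem.Chars.isalpha x <;> simp [pvClassify, g1, g2]) t, ih]
  | case4 c t h1 h2 ih =>
    have hk : pvClassify c = 'S' := by simp [pvClassify, h1, h2]
    rw [List.map_cons, hk,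
      pvCollapse_run 'S' pvNotAlnum
        (fun x => by
          by_cases g1 : PySem.Chars.isdigit x
          · simp [pvNotAlnum, pvClassify, g1]
          · by_cases g2 : PySem.Chars.isalpha x <;> simp [pvNotAlnum, pvClassify, g1, g2]) t, ih]

lemma pvMask_eq (s : String) : pvMaskA s = String.ofList (pvRunMask s.toList) := by
  rw [pvMaskA_eq_collapse, pvRunMask_eq_collapse]

-- ===== VERDICT (by name: the statement is the Claim_ definition above) =====
theorem get_all_uniq_masks_spec : Claim_equal_get_all_uniq_masks := by
  intro source_list _
  show get_all_uniq_masks source_list = get_all_uniq_masks_alt source_list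
  unfold get_all_uniq_masks get_all_uniq_masks_alt
  have h : (fun (acc : List String) s => PySem.Set.add acc (pvMaskA s))
      = (fun (acc : List String) s => PySem.Set.add acc (String.ofList (pvRunMask s.toList))) := by
    funext acc s; rw [pvMask_eq]
  rw [h]
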